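-- pv_equiv track=rewrite | github.com/cmjaimet/fun-with-python | voting/v.py | countFirsts
-- ===== SOURCE A (Python) =====
-- def countFirsts(ballots):
--     firsts = {}
--     for p in candidates:
--         firsts[p] = 0
--     for key in ballots:
--         for cand in ballots[key]:
--             if ( 1 == ballots[key][cand] ):
--                 firsts[cand] += 1
--     return firsts
--
-- candidates = ["Joe","Sandy","Mary","Fred","Julie"]
-- ===== SOURCE B (Python) =====
-- candidates = ["Joe","Sandy","Mary","Fred","Julie"]
--
-- def countFirsts(ballots):
--     return {p: sum(1 for b in ballots.values() if b.get(p) == 1) for p in candidates}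
-- ===== Notes on version B (the rewrite author's own statement) =====
-- stated objective: alternative
-- what changed: A scans each ballot's entries and increments a pre-initialised tally in place; B interchanges the loops: for each candidate it makes one pass over the ballots, testing that candidate's rank by direct dict lookup (b.get(p) == 1) and summing the indicator, so no tally dict is ever mutated and the inner scan over ballot entries disappears.
-- crash fix: On ballots that give rank 1 to a name outside the candidates list A raises KeyError (firsts[cand] += 1 on a missing key); B returns the tally of the five listed candidates, ignoring the unknown name. — e.g. on countFirsts([("b1", [("Zed", 1), ("Joe", 2)])]): A raises KeyError, B returns [("Joe", 0), ("Sandy", 0), ("Mary", 0), ("Fred", 0), ("Julie", 0)]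
import Mathlib
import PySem

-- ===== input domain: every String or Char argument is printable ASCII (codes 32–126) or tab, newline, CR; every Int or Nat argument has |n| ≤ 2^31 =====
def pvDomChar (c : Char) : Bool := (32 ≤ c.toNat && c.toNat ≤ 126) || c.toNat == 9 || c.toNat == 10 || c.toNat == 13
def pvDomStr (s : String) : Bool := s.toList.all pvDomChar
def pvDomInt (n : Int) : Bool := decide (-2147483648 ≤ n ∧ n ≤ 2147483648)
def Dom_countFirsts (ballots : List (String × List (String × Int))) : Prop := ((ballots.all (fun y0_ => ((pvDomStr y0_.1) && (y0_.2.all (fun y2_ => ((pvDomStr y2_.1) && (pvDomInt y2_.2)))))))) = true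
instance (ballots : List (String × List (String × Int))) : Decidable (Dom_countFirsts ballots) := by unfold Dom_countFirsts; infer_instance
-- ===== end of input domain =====

-- B interchanges A's loops: per candidate, one pass over the ballots with a direct dict lookup
-- (b.get(p) == 1), summing indicators, instead of scanning ballot entries and mutating a tally.

-- the module-level constant `candidates`
def pvCandidates : List String := ["Joe", "Sandy", "Mary", "Fred", "Julie"]

-- ===== PORT A =====
def countFirsts (ballots : List (String × List (String × Int))) : List (String × Int) :=
  -- firsts = {}; for p in candidates: firsts[p] = 0
  let bd : PySem.Dict String (List (String × Int)) := PySem.Dict.mk ballots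
  let firsts : PySem.Dict String Int :=
    pvCandidates.foldl (fun d p => d.insert p 0) PySem.Dict.empty
  -- for key in ballots: for cand in ballots[key]: if 1 == ballots[key][cand]: firsts[cand] += 1
  -- (`firsts[cand] += 1` raises KeyError when cand is missing; Pre_ keeps that inside, so the
  --  modify-with-default below only ever updates an existing key on admitted inputs)
  let firsts :=
    bd.keys.foldl (fun d key =>
      let inner : PySem.Dict String Int := PySem.Dict.mk (bd.getD key [])
      inner.keys.foldl (fun d cand =>
        if (1 : Int) == inner.getD cand 0 then d.modify cand 0 (· + 1) else d) d) firsts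
  firsts.items

-- ===== PORT B =====
def countFirsts_alt (ballots : List (String × List (String × Int))) : List (String × Int) :=
  -- {p: sum(1 for b in ballots.values() if b.get(p) == 1) for p in candidates}
  (pvCandidates.foldl (fun d p =>
      d.insert p ((PySem.Dict.mk ballots).values.foldl
        (fun s b => if (PySem.Dict.mk b).get? p == some (1 : Int) then s + 1 else s) (0 : Int)))
    (PySem.Dict.empty : PySem.Dict String Int)).items

-- ===== PRECONDITION & SPEC =====
-- Pre_ excludes (a) inputs where some ballot gives rank 1 to a name outside the candidates list,
-- on which the Python A raises KeyError (see Raises_ below), and (b) association lists with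
-- duplicate outer or inner keys, which represent no Python dict (dict keys are unique).
def Pre_countFirsts (ballots : List (String × List (String × Int))) : Prop :=
  (ballots.map Prod.fst).Nodup ∧
  (∀ kv ∈ ballots, (kv.2.map Prod.fst).Nodup) ∧
  (∀ kv ∈ ballots, ∀ p ∈ kv.2, p.2 = 1 → p.1 ∈ pvCandidates)
instance (ballots : List (String × List (String × Int))) : Decidable (Pre_countFirsts ballots) := by unfold Pre_countFirsts; infer_instance

def pvWitness_countFirsts : (List (String × List (String × Int))) :=
  [("b1", [("Joe", 1), ("Mary", 2)]), ("b2", [("Mary", 1), ("Joe", 3)])]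

-- On ballots that give rank 1 to a name outside the candidates list A raises KeyError
-- (firsts[cand] += 1 on a missing key); B returns the tally of the five listed candidates.
def Raises_countFirsts (ballots : List (String × List (String × Int))) : Prop :=
  (ballots.map Prod.fst).Nodup ∧
  (∀ kv ∈ ballots, (kv.2.map Prod.fst).Nodup) ∧
  (∃ kv ∈ ballots, ∃ p ∈ kv.2, p.2 = 1 ∧ p.1 ∉ pvCandidates)
instance (ballots : List (String × List (String × Int))) : Decidable (Raises_countFirsts ballots) := by unfold Raises_countFirsts; infer_instance

def pvRaiseWitness_countFirsts : (List (String × List (String × Int))) :=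
  [("b1", [("Zed", 1), ("Joe", 2)])]
def pvRaiseWitnessOut_countFirsts : List (String × Int) :=
  [("Joe", 0), ("Sandy", 0), ("Mary", 0), ("Fred", 0), ("Julie", 0)]

def Spec_countFirsts (ballots : List (String × List (String × Int))) (out : List (String × Int)) : Prop := out = countFirsts_alt ballots
instance (ballots : List (String × List (String × Int))) (out : List (String × Int)) : Decidable (Spec_countFirsts ballots out) := by unfold Spec_countFirsts; infer_instance

-- ===== CLAIM (what is proved, stated in full; the proofs are below) =====
def Claim_equal_countFirsts : Prop := ∀ (ballots : List (String × List (String × Int))), Dom_countFirsts ballots → Pre_countFirsts ballots → Spec_countFirsts ballots (countFirsts ballots)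
def Claim_raises_countFirsts : Prop := (∀ (ballots : List (String × List (String × Int))), Dom_countFirsts ballots → Raises_countFirsts ballots → ¬ Pre_countFirsts ballots) ∧ (Dom_countFirsts (pvRaiseWitness_countFirsts) ∧ Raises_countFirsts (pvRaiseWitness_countFirsts) ∧ countFirsts_alt (pvRaiseWitness_countFirsts) = pvRaiseWitnessOut_countFirsts)

-- ===== LEMMAS AND PROOFS =====

-- lookup of a key not equal to the head key skips the head (first-match assoc lookup)
theorem pv_getD_mk_cons_ne {ν : Type} (k : String) (v : ν) (rest : List (String × ν))
    (k' : String) (h : k' ≠ k) (dflt : ν) :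
    (PySem.Dict.mk ((k, v) :: rest)).getD k' dflt = (PySem.Dict.mk rest).getD k' dflt := by
  have hb : (k == k') = false := by simp [h.symm]
  simp [PySem.Dict.getD_eq_get?_getD, PySem.Dict.get?_mk_cons, hb]

theorem pv_getD_mk_cons_self {ν : Type} (k : String) (v : ν) (rest : List (String × ν)) (dflt : ν) :
    (PySem.Dict.mk ((k, v) :: rest)).getD k dflt = v := by
  simp [PySem.Dict.getD_eq_get?_getD, PySem.Dict.get?_mk_cons]

-- Python's `for k in d: … d[k] …` over a dict with unique keys visits exactly the (key, value)
-- pairs of the underlying association list.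
theorem pv_keyloop {ν γ : Type} (l : List (String × ν)) (hn : (l.map Prod.fst).Nodup)
    (g : γ → String → ν → γ) (dflt : ν) (init : γ) :
    ((PySem.Dict.mk l).keys).foldl
        (fun acc k => g acc k ((PySem.Dict.mk l).getD k dflt)) init
      = l.foldl (fun acc kv => g acc kv.1 kv.2) init := by
  induction l generalizing init with
  | nil => rfl
  | cons kv rest ih =>
    obtain ⟨k, v⟩ := kv
    have hn' : (rest.map Prod.fst).Nodup := hn.of_cons
    have hn2 : (k :: rest.map Prod.fst).Nodup := by simpa using hn
    have hk : k ∉ rest.map Prod.fst := (List.nodup_cons.mp hn2).1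
    have hkeys : (PySem.Dict.mk ((k, v) :: rest)).keys = k :: rest.map Prod.fst := by
      simp [PySem.Dict.keys]
    rw [hkeys]
    simp only [List.foldl_cons, pv_getD_mk_cons_self]
    have hcongr :
        (rest.map Prod.fst).foldl
            (fun acc x => g acc x ((PySem.Dict.mk ((k, v) :: rest)).getD x dflt))
            (g init k v)
          = (rest.map Prod.fst).foldl
            (fun acc x => g acc x ((PySem.Dict.mk rest).getD x dflt)) (g init k v) := by
      apply PySem.List.foldl_congr_mem
      intro acc x hx
      have hxk : x ≠ k := fun h => hk (h ▸ hx)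
      rw [pv_getD_mk_cons_ne k v rest x hxk]
    rw [hcongr]
    have := ih hn' (init := g init k v)
    simpa [PySem.Dict.keys, PySem.Dict.items] using this

-- a guarded fold is the fold of the filtered-and-projected list
theorem pv_foldl_if_filter_map {α β γ : Type} (l : List α) (P : α → Bool) (f : α → β)
    (step : γ → β → γ) (init : γ) :
    l.foldl (fun d x => if P x then step d (f x) else d) init
      = ((l.filter P).map f).foldl step init := by
  induction l generalizing init with
  | nil => rfl
  | cons x xs ih =>
    by_cases h : P x <;> simp [h, ih]

-- the flat list of rank-1 candidates, in ballot order
def pvWinners (ballots : List (String × List (String × Int))) : List String :=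
  ballots.flatMap (fun kv => ((kv.2.filter (fun p => (1 : Int) == p.2)).map (fun p => p.1)))

-- A's double loop is one modify-fold over pvWinners
theorem pv_A_loop (ballots : List (String × List (String × Int)))
    (hno : (ballots.map Prod.fst).Nodup)
    (hni : ∀ kv ∈ ballots, (kv.2.map Prod.fst).Nodup)
    (init : PySem.Dict String Int) :
    ((PySem.Dict.mk ballots).keys).foldl (fun d key =>
        (PySem.Dict.mk ((PySem.Dict.mk ballots).getD key [])).keys.foldl (fun d cand =>
          if (1 : Int) == (PySem.Dict.mk ((PySem.Dict.mk ballots).getD key [])).getD cand 0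
          then d.modify cand 0 (· + 1) else d) d) init
      = (pvWinners ballots).foldl (fun d c => d.modify c 0 (· + 1)) init := by
  rw [pv_keyloop ballots hno
      (fun d _key b =>
        (PySem.Dict.mk b).keys.foldl (fun d cand =>
          if (1 : Int) == (PySem.Dict.mk b).getD cand 0 then d.modify cand 0 (· + 1) else d) d)
      [] init]
  have hstep : ballots.foldl (fun d kv =>
        (PySem.Dict.mk kv.2).keys.foldl (fun d cand =>
          if (1 : Int) == (PySem.Dict.mk kv.2).getD cand 0 then d.modify cand 0 (· + 1) else d) d)
        init
      = ballots.foldl (fun d kv =>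
          ((kv.2.filter (fun p => (1 : Int) == p.2)).map (fun p => p.1)).foldl
            (fun d c => d.modify c 0 (· + 1)) d) init := by
    apply PySem.List.foldl_congr_mem
    intro acc kv hkv
    rw [pv_keyloop kv.2 (hni kv hkv)
        (fun d cand r => if (1 : Int) == r then d.modify cand 0 (· + 1) else d) 0 acc]
    rw [pv_foldl_if_filter_map kv.2 (fun p => (1 : Int) == p.2) (fun p => p.1)
        (fun d c => d.modify c 0 (· + 1)) acc]
  rw [hstep, pvWinners, List.foldl_flatMap]

-- per ballot with unique keys: the number of rank-1 entries for p is B's lookup indicator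
theorem pv_inner_count (l : List (String × Int)) (hn : (l.map Prod.fst).Nodup) (p : String) :
    (((l.filter (fun q => (1 : Int) == q.2)).map Prod.fst).count p : Int)
      = if (PySem.Dict.mk l).get? p == some (1 : Int) then (1 : Int) else 0 := by
  induction l with
  | nil => simp [PySem.Dict.get?]
  | cons kv rest ih =>
    obtain ⟨k, v⟩ := kv
    have hn2 : (k :: rest.map Prod.fst).Nodup := by simpa using hn
    have hk : k ∉ rest.map Prod.fst := (List.nodup_cons.mp hn2).1
    have ih' := ih (List.nodup_cons.mp hn2).2
    rw [PySem.Dict.get?_mk_cons]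
    by_cases hkp : k = p
    · subst hkp
      have hrest : ((rest.filter (fun q => (1 : Int) == q.2)).map Prod.fst).count k = 0 := by
        rw [List.count_eq_zero]
        intro hmem
        exact hk (by
          rcases List.mem_map.mp hmem with ⟨q, hq, hq1⟩
          exact hq1 ▸ List.mem_map_of_mem (List.mem_of_mem_filter hq))
      by_cases hv : (1 : Int) == v
      · simp [hrest, (eq_of_beq hv).symm]
      · have hv' : ¬ v = 1 := fun h => hv (by simp [h])
        simp [hv, hrest, hv']
    · have hb : (k == p) = false := by simp [hkp]
      by_cases hv : (1 : Int) == v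
      · simp [hv, hb, hkp, ih']
      · simp [hv, hb, ih']

-- the count of p over all ballots equals B's indicator sum over ballots.values()
theorem pv_count_sum (ballots : List (String × List (String × Int)))
    (hni : ∀ kv ∈ ballots, (kv.2.map Prod.fst).Nodup) (p : String) :
    ((pvWinners ballots).count p : Int)
      = (ballots.map (fun kv =>
          if (PySem.Dict.mk kv.2).get? p == some (1 : Int) then (1 : Int) else 0)).sum := by
  induction ballots with
  | nil => simp [pvWinners]
  | cons kv rest ih =>
    have hni' : ∀ kv' ∈ rest, (kv'.2.map Prod.fst).Nodup :=
      fun kv' h => hni kv' (List.mem_cons_of_mem _ h)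
    have ihr := ih hni'
    simp only [pvWinners] at ihr ⊢
    simp only [List.flatMap_cons, List.count_append, List.map_cons, List.sum_cons]
    rw [Nat.cast_add, ihr, pv_inner_count kv.2 (hni kv (List.mem_cons_self)) p]

theorem pv_count_eq_sum (ballots : List (String × List (String × Int)))
    (hni : ∀ kv ∈ ballots, (kv.2.map Prod.fst).Nodup) (p : String) :
    ((pvWinners ballots).count p : Int)
      = (PySem.Dict.mk ballots).values.foldl
          (fun s b => if (PySem.Dict.mk b).get? p == some (1 : Int) then s + 1 else s) 0 := by
  have hvals : (PySem.Dict.mk ballots).values = ballots.map Prod.snd := by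
    simp [PySem.Dict.values]
  rw [hvals]
  have hfold : (ballots.map Prod.snd).foldl
      (fun s b => if (PySem.Dict.mk b).get? p == some (1 : Int) then s + 1 else s) (0 : Int)
    = (ballots.map Prod.snd).foldl
      (fun s b => s + (if (PySem.Dict.mk b).get? p == some (1 : Int) then (1 : Int) else 0)) 0 := by
    apply PySem.List.foldl_congr_mem
    intro s b _; split <;> simp
  rw [hfold, PySem.List.foldl_add, zero_add, List.map_map, pv_count_sum ballots hni p]
  rfl

-- ===== VERDICT (by name: the statement is the Claim_ definition above) =====
set_option maxRecDepth 4096 in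
theorem countFirsts_spec : Claim_equal_countFirsts := by
  intro ballots _hdom hpre
  obtain ⟨hno, hni, hmem⟩ := hpre
  unfold Spec_countFirsts
  simp only [countFirsts, countFirsts_alt]
  rw [pv_A_loop ballots hno hni]
  have hWmem : ∀ c ∈ pvWinners ballots, c ∈ pvCandidates := by
    intro c hc
    simp only [pvWinners, List.mem_flatMap, List.mem_map, List.mem_filter] at hc
    obtain ⟨kv, hkv, p, ⟨hp, h1⟩, rfl⟩ := hc
    exact hmem kv hkv p hp (eq_of_beq h1).symm
  -- right-hand side: the dict comprehension over distinct fresh keys is a map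
  rw [PySem.Dict.items_foldl_insert_fresh pvCandidates (fun p => p)
      (fun p => (PySem.Dict.mk ballots).values.foldl
        (fun s b => if (PySem.Dict.mk b).get? p == some (1 : Int) then s + 1 else s) 0)
      PySem.Dict.empty
      (by intro a _; simp) (by decide)]
  -- left-hand side: keys of the modify-fold stay the candidate list
  have hkeysinit : (pvCandidates.foldl (fun d p => d.insert p 0)
      (PySem.Dict.empty : PySem.Dict String Int)).keys = pvCandidates := by decide
  have hkeysR : ((pvWinners ballots).foldl (fun d c => d.modify c 0 (· + 1))
      (pvCandidates.foldl (fun d p => d.insert p 0)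
        (PySem.Dict.empty : PySem.Dict String Int))).keys = pvCandidates := by
    rw [PySem.Dict.keys_foldl_modify (pvWinners ballots) 0 (fun _ _ => (· + 1))]
    rw [hkeysinit, PySem.Set.update_eq_append_filter]
    have hnil : ((PySem.Set.ofList (pvWinners ballots)).filter
        (fun y => !(PySem.Set.contains pvCandidates y))) = [] := by
      rw [List.filter_eq_nil_iff]
      intro y hy
      have hyW : y ∈ pvWinners ballots := by
        simpa [PySem.Set.mem_ofList] using hy
      simp [PySem.Set.contains]
      exact hWmem y hyW
    rw [hnil, List.append_nil]
  have hnodup : ((pvWinners ballots).foldl (fun d c => d.modify c 0 (· + 1))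
      (pvCandidates.foldl (fun d p => d.insert p 0)
        (PySem.Dict.empty : PySem.Dict String Int))).keys.Nodup := by
    rw [hkeysR]; decide
  rw [PySem.Dict.items_eq_map_keys _ hnodup 0, hkeysR]
  have hget : ∀ c ∈ pvCandidates, ((pvWinners ballots).foldl (fun d c => d.modify c 0 (· + 1))
      (pvCandidates.foldl (fun d p => d.insert p 0)
        (PySem.Dict.empty : PySem.Dict String Int))).getD c 0
        = (PySem.Dict.mk ballots).values.foldl
            (fun s b => if (PySem.Dict.mk b).get? c == some (1 : Int) then s + 1 else s) 0 := by
    intro c hc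
    rw [PySem.Dict.getD_foldl_modify_add_one]
    have h0 : (pvCandidates.foldl (fun d p => d.insert p 0)
        (PySem.Dict.empty : PySem.Dict String Int)).getD c 0 = 0 := by
      fin_cases hc <;> rfl
    rw [h0, zero_add, pv_count_eq_sum ballots hni c]
  rw [show (PySem.Dict.empty : PySem.Dict String Int).items = [] from rfl, List.nil_append]
  exact List.map_congr_left (fun c hc => by rw [hget c hc])

@[simp] theorem countFirsts_raises : Claim_raises_countFirsts := by
  unfold Claim_raises_countFirsts
  refine ⟨?_, by decide⟩
  intro ballots _hdom hr hpre
  obtain ⟨-, -, kv, hkv, p, hp, h1, hnot⟩ := hr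
  exact hnot (hpre.2.2 kv hkv p hp h1)
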